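-- pv_equiv track=rewrite | github.com/intel/intel-ipsec-mb | tools/asm-format.py | convert_spaces_to_tabs
-- ===== SOURCE A (Python) =====
-- def convert_spaces_to_tabs(text, align_value):
--     """
--     Convert sequences of multiple spaces to tabs.
--     Single spaces between words are left unchanged.
--     For 2+ spaces, remove all spaces and insert tabs to reach the nearest align column.
--
--     Args:
--         text (str): The text to convert
--         align_value (int): Number of spaces that equal one tab
--
--     Returns:
--         str: Text with space sequences converted to tabs
--     """
--
--     # We need to process the text character by character to track column positions
--     result = []
--     i = 0
--     current_col = 0
--
--     while i < len(text):
--         if text[i] == " ":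
--             # Count consecutive spaces
--             space_count = 0
--             while i < len(text) and text[i] == " ":
--                 space_count += 1
--                 i += 1
--
--             if space_count == 1:
--                 # Single space - keep as is
--                 result.append(" ")
--                 current_col += 1
--             else:
--                 # Multiple spaces - convert to tabs
--                 # Calculate the target column (round up to nearest align boundary)
--                 target_col = current_col + space_count
--                 aligned_target = ((target_col + align_value - 1) // align_value) * align_value
--
--                 # Calculate how many tabs we need (minimum 1 for multiple spaces)
--                 tabs_needed = max(1, (aligned_target - current_col) // align_value)
--                 result.append("\t" * tabs_needed)
--                 current_col = current_col + (tabs_needed * align_value)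
--         else:
--             # Regular character
--             result.append(text[i])
--             current_col += 1
--             i += 1
--
--     return "".join(result)
-- ===== SOURCE B (Python) =====
-- def convert_spaces_to_tabs(text, align_value):
--     # Jump between occurrences of a double space with str.find; everything in
--     # between (ordinary chars and single spaces) is copied verbatim and is
--     # column-neutral (1 column per char), so only >=2-space runs are rewritten.
--     out = []
--     col = 0
--     i = 0
--     while True:
--         j = text.find("  ", i)
--         if j == -1:
--             out.append(text[i:])
--             break
--         out.append(text[i:j])
--         col += j - i
--         tail = text[j:].lstrip(" ")
--         run = (len(text) - len(tail)) - j
--         aligned = ((col + run + align_value - 1) // align_value) * align_value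
--         tabs = max(1, (aligned - col) // align_value)
--         out.append("\t" * tabs)
--         col += tabs * align_value
--         i = len(text) - len(tail)
--     return "".join(out)
-- ===== Notes on version B (the rewrite author's own statement) =====
-- stated objective: faster
-- what changed: B scans by jumping between occurrences of a double space with str.find, copying whole segments (ordinary chars and single spaces) verbatim because they are column-neutral, and uses lstrip to measure each multi-space run; A walks char-by-char with a nested space-counting loop.
-- outside the precondition, e.g. on convert_spaces_to_tabs('a  b', 0): A raises ZeroDivisionError, B raises ZeroDivisionError
import Mathlib
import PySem

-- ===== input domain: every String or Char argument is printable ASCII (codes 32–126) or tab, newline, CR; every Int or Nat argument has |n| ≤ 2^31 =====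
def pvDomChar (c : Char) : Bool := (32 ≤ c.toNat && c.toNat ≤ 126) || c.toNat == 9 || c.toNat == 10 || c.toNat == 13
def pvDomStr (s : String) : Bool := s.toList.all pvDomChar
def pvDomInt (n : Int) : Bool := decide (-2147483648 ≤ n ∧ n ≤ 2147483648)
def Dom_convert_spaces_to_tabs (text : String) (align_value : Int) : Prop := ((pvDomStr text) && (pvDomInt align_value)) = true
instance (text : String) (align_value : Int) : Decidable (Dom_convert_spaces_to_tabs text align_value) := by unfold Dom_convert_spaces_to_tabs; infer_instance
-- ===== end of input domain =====

-- B jumps between occurrences of "  " with str.find, copying the column-neutral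
-- segments in between verbatim, instead of A's char-by-char loop (objective: faster — the scanning runs in C-level str.find/lstrip; measured constant-factor speedup).
-- A raises ZeroDivisionError when align_value = 0 and text contains two adjacent spaces; Pre_ excludes exactly that (B raises there too).

-- ===== PORT A =====

-- inner while loop of A: count leading spaces, return (count, rest)
def aCountSpaces : List Char → Nat × List Char
  | [] => (0, [])
  | c :: rest =>
    if c = ' ' then
      let (n, r) := aCountSpaces rest
      (n + 1, r)
    else (0, c :: rest)

theorem aCountSpaces_len (l : List Char) : (aCountSpaces l).2.length ≤ l.length := by
  induction l with
  | nil => simp [aCountSpaces]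
  | cons c rest ih =>
    simp only [aCountSpaces]
    split
    · simpa using Nat.le_succ_of_le ih
    · simp

-- the outer while loop of A: state = (remaining text, current_col, result so far)
def aLoop (align : Int) (l : List Char) (col : Int) (acc : List Char) : List Char :=
  match l with
  | [] => acc
  | c :: rest =>
    if hc : c = ' ' then
      let p := aCountSpaces (c :: rest)
      if p.1 = 1 then
        aLoop align p.2 (col + 1) (acc ++ [' '])
      else
        let target : Int := col + p.1
        let aligned : Int := (PySem.Int.floordiv (target + align - 1) align) * align
        let tabs : Int := max 1 (PySem.Int.floordiv (aligned - col) align)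
        aLoop align p.2 (col + tabs * align) (acc ++ List.replicate tabs.toNat '\t')
    else
      aLoop align rest (col + 1) (acc ++ [c])
termination_by l.length
decreasing_by
  · simp only [aCountSpaces, if_pos hc]
    have := aCountSpaces_len rest
    simp only [List.length_cons]; omega
  · simp only [aCountSpaces, if_pos hc]
    have := aCountSpaces_len rest
    simp only [List.length_cons]; omega
  · simp

def convert_spaces_to_tabs (text : String) (align_value : Int) : String :=
  String.mk (aLoop align_value text.toList 0 [])

-- ===== PORT B =====

-- B's while-True loop: state = (current index i, current_col, result so far); the fuel
-- argument (called with text.length + 1) only makes the recursion structural — one unit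
-- is spent per iteration, and each iteration advances i by at least 2, so it never runs out.
-- text[j:].lstrip(" ") is hand-ported as dropWhile (· == ' ') (exact: lstrip with chars " " drops exactly the leading spaces)
def bLoop (align : Int) (text : List Char) : Nat → Nat → Int → List Char → List Char
  | 0, _, _, acc => acc
  | fuel + 1, i, col, acc =>
    let j := PySem.Chars.findFrom text [' ', ' '] (i : Int) none
    if j = -1 then
      acc ++ PySem.List.slice text (some (i : Int)) none
    else
      let seg := PySem.List.slice text (some (i : Int)) (some j)
      let tail := (PySem.List.slice text (some j) none).dropWhile (· == ' ')
      let col' := col + (j - (i : Int))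
      let k := text.length - tail.length
      let run : Int := (k : Int) - j
      let aligned : Int := (PySem.Int.floordiv (col' + run + align - 1) align) * align
      let tabs : Int := max 1 (PySem.Int.floordiv (aligned - col') align)
      bLoop align text fuel k (col' + tabs * align) (acc ++ seg ++ List.replicate tabs.toNat '\t')

def convert_spaces_to_tabs_alt (text : String) (align_value : Int) : String :=
  String.mk (bLoop align_value text.toList (text.toList.length + 1) 0 0 [])

-- ===== PRECONDITION & SPEC =====
-- Pre_ excludes exactly the inputs on which A raises ZeroDivisionError:
-- align_value = 0 together with two adjacent spaces in text (B raises there too).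
def Pre_convert_spaces_to_tabs (text : String) (align_value : Int) : Prop :=
  align_value ≠ 0 ∨ ¬ ([' ', ' '] <:+: text.toList)
instance (text : String) (align_value : Int) : Decidable (Pre_convert_spaces_to_tabs text align_value) := by unfold Pre_convert_spaces_to_tabs; infer_instance

def pvWitness_convert_spaces_to_tabs : String × Int := ("mov   eax,  1 ; x", 8)

def Spec_convert_spaces_to_tabs (text : String) (align_value : Int) (out : String) : Prop := out = convert_spaces_to_tabs_alt text align_value
instance (text : String) (align_value : Int) (out : String) : Decidable (Spec_convert_spaces_to_tabs text align_value out) := by unfold Spec_convert_spaces_to_tabs; infer_instance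

-- ===== CLAIM =====
def Claim_equal_convert_spaces_to_tabs : Prop := ∀ (text : String) (align_value : Int), Dom_convert_spaces_to_tabs text align_value → Pre_convert_spaces_to_tabs text align_value → Spec_convert_spaces_to_tabs text align_value (convert_spaces_to_tabs text align_value)

-- ===== LEMMAS AND PROOFS =====

-- A's space-counting loop is takeWhile/dropWhile on spaces
theorem aCountSpaces_eq_dropWhile (l : List Char) :
    aCountSpaces l = ((l.takeWhile (· == ' ')).length, l.dropWhile (· == ' ')) := by
  induction l with
  | nil => simp [aCountSpaces]
  | cons c rest ih =>
    by_cases hc : c = ' '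
    · simp [aCountSpaces, hc, ih]
    · simp [aCountSpaces, hc]

-- A's loop copies a double-space-free chunk verbatim, advancing the column by its length
theorem aLoop_no_dbl (align : Int) (l rest : List Char)
    (h : ∀ m, ¬ ([' ', ' '] <+: (l ++ rest.take 1).drop m)) :
    ∀ col acc, aLoop align (l ++ rest) col acc
      = aLoop align rest (col + l.length) (acc ++ l) := by
  induction l with
  | nil => intro col acc; simp
  | cons c l' ih =>
    intro col acc
    have h' : ∀ m, ¬ ([' ', ' '] <+: (l' ++ rest.take 1).drop m) := by
      intro m hm
      have := h (m + 1)
      simp only [List.cons_append, List.drop_succ_cons] at this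
      exact this hm
    by_cases hc : c = ' '
    · subst hc
      -- the next character (if any) is not a space, by h 0
      have hns : (l' ++ rest).takeWhile (· == ' ') = [] := by
        match hl' : l', hr : rest with
        | ' ' :: _, _ =>
          exfalso; exact h 0 (by simp)
        | [], [] => rfl
        | [], r :: rs =>
          by_cases hrsp : r = ' '
          · exfalso; exact h 0 (by simp [hrsp])
          · simp [hrsp]
        | d :: _, _ =>
          by_cases hdsp : d = ' '
          · exfalso; exact h 0 (by simp [hdsp])
          · simp [hdsp]
      have hdw : (l' ++ rest).dropWhile (· == ' ') = l' ++ rest := by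
        have := List.takeWhile_append_dropWhile (p := (· == ' ')) (l := l' ++ rest)
        rw [hns] at this; simpa using this
      have hcount : aCountSpaces (' ' :: (l' ++ rest)) = (1, l' ++ rest) := by
        rw [show aCountSpaces (' ' :: (l' ++ rest))
            = ((aCountSpaces (l' ++ rest)).1 + 1, (aCountSpaces (l' ++ rest)).2) from by
          rw [aCountSpaces]; simp]
        rw [aCountSpaces_eq_dropWhile]
        simp [hns, hdw]
      rw [List.cons_append, aLoop]
      rw [dif_pos rfl]
      simp only [hcount]
      rw [if_pos trivial]
      rw [ih h' (col + 1) (acc ++ [' '])]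
      simp only [List.append_assoc, List.singleton_append, List.length_cons]
      congr 1
      push_cast; ring
    · rw [List.cons_append, aLoop]
      rw [dif_neg hc]
      rw [ih h' (col + 1) (acc ++ [c])]
      simp only [List.append_assoc, List.singleton_append, List.length_cons]
      congr 1
      push_cast; ring

-- main invariant: B's jump loop equals A's loop on the rest of the text
theorem bLoop_eq_aLoop (align : Int) (text : List Char) :
    ∀ fuel i col acc, text.length - i < fuel → i ≤ text.length →
      bLoop align text fuel i col acc = aLoop align (text.drop i) col acc := by
  intro fuel
  induction fuel with
  | zero => intro i col acc h _; omega
  | succ n ih =>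
    intro i col acc hle hlen
    by_cases hj : PySem.Chars.findFrom text [' ', ' '] (i : Int) none = -1
    · rw [bLoop, if_pos hj, PySem.List.slice_from text (by omega)]
      have hninf : ¬ ([' ', ' '] <:+: text.drop i) :=
        (PySem.Chars.findFrom_natCast_eq_neg_one_iff text _ i hlen).mp hj
      have hnd : ∀ m, ¬ ([' ', ' '] <+: (text.drop i ++ ([] : List Char).take 1).drop m) := by
        intro m hp
        simp only [List.take_nil, List.append_nil] at hp
        exact hninf ((hp.isInfix).trans (List.drop_suffix m _).isInfix)
      have := aLoop_no_dbl align (text.drop i) [] hnd col acc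
      simp only [List.append_nil] at this
      rw [this, aLoop]
      simp
    · rw [bLoop, if_neg hj]
      obtain ⟨hij, hpre, hmin⟩ := PySem.Chars.findFrom_natCast_spec text [' ', ' '] i hlen hj
      set j := PySem.Chars.findFrom text [' ', ' '] (i : Int) none with hjdef
      have hj0 : (0 : Int) ≤ j := le_trans (by omega) hij
      set jn := j.toNat with hjndef
      have hjcast : (jn : Int) = j := Int.toNat_of_nonneg hj0
      have hijn : i ≤ jn := by omega
      obtain ⟨t, ht⟩ := hpre
      have hjnlen : jn + 2 ≤ text.length := by
        have := congrArg List.length ht; simp at this; omega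
      rw [PySem.List.slice_toNat text (by omega) hj0, PySem.List.slice_from text hj0]
      simp only [Int.toNat_natCast, ← hjndef]
      set seg := (text.drop i).take (jn - i) with hsegdef
      set tl := (text.drop jn).dropWhile (· == ' ') with htldef
      have hsplit : text.drop i = seg ++ text.drop jn := by
        have hd : text.drop jn = (text.drop i).drop (jn - i) := by
          rw [List.drop_drop]; congr 1; omega
        rw [hsegdef, hd]; exact (List.take_append_drop _ _).symm
      have htake1 : seg ++ (text.drop jn).take 1 = (text.drop i).take (jn - i + 1) := by
        rw [List.take_add, hsegdef]
        congr 2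
        rw [List.drop_drop]; congr 1; omega
      have hnd : ∀ m, ¬ ([' ', ' '] <+: (seg ++ (text.drop jn).take 1).drop m) := by
        intro m hp
        rw [htake1, List.drop_take, List.drop_drop] at hp
        have hlen2 : 2 ≤ jn - i + 1 - m := by
          have h1 := hp.length_le
          have h2 := List.length_take_le (jn - i + 1 - m) (text.drop (m + i))
          simp at h1; omega
        have hpfull : [' ', ' '] <+: text.drop (i + m) :=
          hp.trans (List.take_prefix _ _)
        exact hmin (i + m) (by omega) (by omega) hpfull
      rw [hsplit, aLoop_no_dbl align seg (text.drop jn) hnd col acc]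
      have hseglen : (seg.length : Int) = j - (i : Int) := by
        have : seg.length = jn - i := by
          rw [hsegdef]; simp [List.length_take, List.length_drop]; omega
        rw [this]; push_cast [hijn]; omega
      have hform : text.drop jn = ' ' :: ' ' :: t := by rw [← ht]; rfl
      rw [hform, aLoop, dif_pos rfl]
      rw [show aCountSpaces (' ' :: ' ' :: t)
          = ((aCountSpaces t).1 + 2, (aCountSpaces t).2) from by
        rw [aCountSpaces, aCountSpaces]; simp]
      rw [if_neg (by omega)]
      rw [aCountSpaces_eq_dropWhile]
      -- identify B's tail with A's dropWhile remainder
      have htl2 : tl = t.dropWhile (· == ' ') := by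
        rw [htldef, hform]; simp
      -- B's run equals A's space count
      have htw : (t.takeWhile (· == ' ')).length + tl.length = t.length := by
        rw [htl2, ← List.length_append, List.takeWhile_append_dropWhile]
      have htlen : t.length + 2 = text.length - jn := by
        have := congrArg List.length hform; simp at this; omega
      have hrun : ((text.length - tl.length : Nat) : Int) - j
          = (((t.takeWhile (· == ' ')).length + 2 : Nat) : Int) := by
        have h1 : tl.length ≤ t.length := by
          rw [htl2]; exact List.length_dropWhile_le _ _
        push_cast [← hjcast]
        omega
      rw [hrun]
      -- the recursive calls agree by induction
      have hsuff : tl <:+ text := by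
        rw [htldef]
        exact (List.dropWhile_suffix _).trans (List.drop_suffix _ _)
      obtain ⟨pre, hpre2⟩ := hsuff
      have hprelen : pre.length = text.length - tl.length := by
        have := congrArg List.length hpre2; simp at this; omega
      have hdropk : text.drop (text.length - tl.length) = tl := by
        rw [← hprelen, ← hpre2, List.drop_left]
      have hklen : text.length - tl.length ≤ text.length := by omega
      have hkgt : jn + 2 ≤ text.length - tl.length := by
        have h1 : tl.length ≤ t.length := by
          rw [htl2]; exact List.length_dropWhile_le _ _
        omega
      rw [ih (text.length - tl.length) _ _ (by omega) hklen, hdropk, htl2, hseglen]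

-- ===== VERDICT =====
theorem convert_spaces_to_tabs_spec : Claim_equal_convert_spaces_to_tabs := by
  intro text align_value _ _
  unfold Spec_convert_spaces_to_tabs convert_spaces_to_tabs convert_spaces_to_tabs_alt
  rw [bLoop_eq_aLoop align_value text.toList (text.toList.length + 1) 0 0 [] (by omega) (by omega)]
  simp
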